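-- pv_equiv track=rewrite | github.com/jasmeralia/SassBot | DataGrapher.py | getTodaysLists
-- ===== SOURCE A (Python) =====
-- def getTodaysLists(presencesDict):
--     x = []
--     yTotalUsers = []
--     yDnd = []
--     yOnline = []
--     yIdle = []
--     for k, v in presencesDict.items():
--         if v:
--             x.append(str(k))
--             totalUsers = 0
--             dnd = 0
--             online = 0
--             idle = 0
--             for keys, vals in v.items():
--                 totalUsers += vals
--                 if keys == 'dnd':
--                     dnd += vals
--                 elif keys == 'online':
--                     online += vals
--                 elif keys == 'idle':
--                     idle += vals
--             yTotalUsers.append(int(totalUsers))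
--             yDnd.append(int(dnd))
--             yOnline.append(int(online))
--             yIdle.append(int(idle))
--     return x,yTotalUsers,yDnd,yOnline,yIdle
-- ===== SOURCE B (Python) =====
-- def getTodaysLists(presencesDict):
--     slot = {'dnd': 1, 'online': 2, 'idle': 3}
--     items = [(str(k), cat, n) for k, v in presencesDict.items() for cat, n in v.items()]
--     acc = {}
--     for k, cat, n in items:
--         if k not in acc:
--             acc[k] = [0, 0, 0, 0]
--         row = acc[k]
--         row[0] += n
--         i = slot.get(cat)
--         if i is not None:
--             row[i] += n
--     rows = list(acc.values())
--     return (list(acc.keys()),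
--             [r[0] for r in rows],
--             [r[1] for r in rows],
--             [r[2] for r in rows],
--             [r[3] for r in rows])
-- ===== Notes on version B (the rewrite author's own statement) =====
-- stated objective: alternative
-- what changed: A's nested loops appending to five parallel lists with an if/elif dispatch are replaced by flattening to (key, category, count) triples, one flat loop accumulating 4-slot rows in a dict keyed by entry with a table-driven slot lookup, and a final assembly of the five lists from the dict.
import Mathlib
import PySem

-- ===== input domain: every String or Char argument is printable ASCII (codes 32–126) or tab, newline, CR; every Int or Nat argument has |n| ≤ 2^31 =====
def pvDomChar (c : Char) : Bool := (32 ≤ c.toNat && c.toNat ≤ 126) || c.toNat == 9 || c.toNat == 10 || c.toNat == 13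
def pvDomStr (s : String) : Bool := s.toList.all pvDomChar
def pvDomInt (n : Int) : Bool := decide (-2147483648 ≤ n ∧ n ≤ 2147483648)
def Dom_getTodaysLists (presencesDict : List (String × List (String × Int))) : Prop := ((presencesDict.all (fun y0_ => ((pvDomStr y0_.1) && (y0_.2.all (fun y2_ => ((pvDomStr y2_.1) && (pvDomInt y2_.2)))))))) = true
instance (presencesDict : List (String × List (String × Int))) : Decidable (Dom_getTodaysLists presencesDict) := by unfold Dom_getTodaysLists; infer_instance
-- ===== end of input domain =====

-- B flattens the nested dicts to (key, category, count) triples, accumulates 4-slot rows in a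
-- dict keyed by entry with a table-driven slot lookup, and assembles the five lists at the end
-- (objective: alternative decomposition, same cost).

-- ===== PORT A =====
-- inner loop of A: fold over v with state (totalUsers, dnd, online, idle)
def pvInnerA (v : List (String × Int)) (st : Int × Int × Int × Int) : Int × Int × Int × Int :=
  v.foldl (fun st p =>
    match st with
    | (t, d, o, i) =>
      let t := t + p.2
      if p.1 == "dnd" then (t, d + p.2, o, i)
      else if p.1 == "online" then (t, d, o + p.2, i)
      else if p.1 == "idle" then (t, d, o, i + p.2)
      else (t, d, o, i)) st

-- body of A's outer loop
def pvStepA (acc : List String × List Int × List Int × List Int × List Int)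
    (kv : String × List (String × Int)) : List String × List Int × List Int × List Int × List Int :=
  match acc with
  | (x, yT, yD, yO, yI) =>
    if kv.2 ≠ [] then
      let s := pvInnerA kv.2 (0, 0, 0, 0)
      (x ++ [kv.1], yT ++ [s.1], yD ++ [s.2.1], yO ++ [s.2.2.1], yI ++ [s.2.2.2])
    else (x, yT, yD, yO, yI)

def getTodaysLists (presencesDict : List (String × List (String × Int))) : List String × List Int × List Int × List Int × List Int :=
  presencesDict.foldl pvStepA ([], [], [], [], [])

-- ===== PORT B =====
-- slot = {'dnd': 1, 'online': 2, 'idle': 3}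
def pvSlot : PySem.Dict String Int := PySem.Dict.mk [("dnd", 1), ("online", 2), ("idle", 3)]

-- items = [(str(k), cat, n) for k, v in presencesDict.items() for cat, n in v.items()]
def pvItemsB (presencesDict : List (String × List (String × Int))) : List (String × String × Int) :=
  presencesDict.flatMap (fun p => p.2.map (fun q => (p.1, q.1, q.2)))

-- loop body; Python's 4-element list row [r0, r1, r2, r3] is ported as a 4-tuple
-- (only the fixed indices 0..3 are ever read or written, so this is exact)
def pvStepB (acc : PySem.Dict String (Int × Int × Int × Int)) (t : String × String × Int) :
    PySem.Dict String (Int × Int × Int × Int) :=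
  let acc := if acc.contains t.1 then acc else acc.insert t.1 (0, 0, 0, 0)   -- if k not in acc: acc[k] = [0,0,0,0]
  let row := acc.getD t.1 (0, 0, 0, 0)                                       -- row = acc[k]
  let row := (row.1 + t.2.2, row.2.1, row.2.2.1, row.2.2.2)                  -- row[0] += n
  let row :=                                                                 -- i = slot.get(cat); if i is not None: row[i] += n
    match pvSlot.get? t.2.1 with
    | none => row
    | some i =>
      if i = 1 then (row.1, row.2.1 + t.2.2, row.2.2.1, row.2.2.2)
      else if i = 2 then (row.1, row.2.1, row.2.2.1 + t.2.2, row.2.2.2)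
      else (row.1, row.2.1, row.2.2.1, row.2.2.2 + t.2.2)
  acc.insert t.1 row

def getTodaysLists_alt (presencesDict : List (String × List (String × Int))) : List String × List Int × List Int × List Int × List Int :=
  let acc := (pvItemsB presencesDict).foldl pvStepB PySem.Dict.empty
  let rows := acc.values
  (acc.keys, rows.map (·.1), rows.map (·.2.1), rows.map (·.2.2.1), rows.map (·.2.2.2))

-- ===== PRECONDITION & SPEC =====
-- Pre_ excludes association lists with duplicate OUTER keys: a real Python dict cannot contain
-- them (the argument is a dict), and there A appends one row per occurrence while B merges them.
def Pre_getTodaysLists (presencesDict : List (String × List (String × Int))) : Prop :=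
  (presencesDict.map Prod.fst).Nodup
instance (presencesDict : List (String × List (String × Int))) : Decidable (Pre_getTodaysLists presencesDict) := by unfold Pre_getTodaysLists; infer_instance
def pvWitness_getTodaysLists : (List (String × List (String × Int))) :=
  [("a", [("dnd", 2), ("online", 3)]), ("b", [])]

def Spec_getTodaysLists (presencesDict : List (String × List (String × Int))) (out : List String × List Int × List Int × List Int × List Int) : Prop := out = getTodaysLists_alt presencesDict
instance (presencesDict : List (String × List (String × Int))) (out : List String × List Int × List Int × List Int × List Int) : Decidable (Spec_getTodaysLists presencesDict out) := by unfold Spec_getTodaysLists; infer_instance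

-- ===== CLAIM (what is proved, stated in full; the proofs are below) =====
def Claim_equal_getTodaysLists : Prop := ∀ (presencesDict : List (String × List (String × Int))), Dom_getTodaysLists presencesDict → Pre_getTodaysLists presencesDict → Spec_getTodaysLists presencesDict (getTodaysLists presencesDict)

-- ===== LEMMAS AND PROOFS =====
-- sum of the values whose key matches
def pvKeySum (v : List (String × Int)) (key : String) : Int :=
  ((v.filter (fun q => q.1 == key)).map Prod.snd).sum

-- the per-(category, count) row update, written pointwise
def pvRowStep (r : Int × Int × Int × Int) (q : String × Int) : Int × Int × Int × Int :=
  (r.1 + q.2,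
   r.2.1 + (if q.1 = "dnd" then q.2 else 0),
   r.2.2.1 + (if q.1 = "online" then q.2 else 0),
   r.2.2.2 + (if q.1 = "idle" then q.2 else 0))

-- the row accumulated over a whole inner dict
def pvRowOf (v : List (String × Int)) : Int × Int × Int × Int :=
  ((v.map Prod.snd).sum, pvKeySum v "dnd", pvKeySum v "online", pvKeySum v "idle")

-- the canonical per-entry rows both programs produce
def pvRows (presencesDict : List (String × List (String × Int))) : List (String × (Int × Int × Int × Int)) :=
  (presencesDict.filter (fun p => !p.2.isEmpty)).map (fun p => (p.1, pvRowOf p.2))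

theorem pvFoldRow_eq (v : List (String × Int)) (t d o i : Int) :
    v.foldl pvRowStep (t, d, o, i) =
      (t + (v.map Prod.snd).sum, d + pvKeySum v "dnd", o + pvKeySum v "online", i + pvKeySum v "idle") := by
  induction v generalizing t d o i with
  | nil => simp [pvKeySum]
  | cons p rest ih =>
    rw [List.foldl_cons]
    show List.foldl pvRowStep (pvRowStep (t, d, o, i) p) rest = _
    rw [show pvRowStep (t, d, o, i) p =
        (t + p.2, d + (if p.1 = "dnd" then p.2 else 0), o + (if p.1 = "online" then p.2 else 0),
         i + (if p.1 = "idle" then p.2 else 0)) from rfl, ih]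
    simp [pvKeySum, List.filter_cons]
    split_ifs <;> simp_all <;> ring_nf <;> simp [add_comm, add_left_comm]

theorem pvInnerA_eq (v : List (String × Int)) (t d o i : Int) :
    pvInnerA v (t, d, o, i) =
      (t + (v.map Prod.snd).sum, d + pvKeySum v "dnd", o + pvKeySum v "online", i + pvKeySum v "idle") := by
  induction v generalizing t d o i with
  | nil => simp [pvInnerA, pvKeySum]
  | cons p rest ih =>
    obtain ⟨k, x⟩ := p
    simp only [pvInnerA, List.foldl_cons] at ih ⊢
    by_cases h1 : k = "dnd"
    · subst h1
      rw [if_pos (by decide), ih]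
      simp [pvKeySum, List.filter_cons, add_assoc]
    · by_cases h2 : k = "online"
      · subst h2
        rw [if_neg (by decide), if_pos (by decide), ih]
        simp [pvKeySum, List.filter_cons, add_assoc]
      · by_cases h3 : k = "idle"
        · subst h3
          rw [if_neg (by decide), if_neg (by decide), if_pos (by decide), ih]
          simp [pvKeySum, List.filter_cons, add_assoc]
        · rw [if_neg (by simp [h1]), if_neg (by simp [h2]), if_neg (by simp [h3]), ih]
          simp [pvKeySum, List.filter_cons, h1, h2, h3, add_assoc]

-- A's fold appends exactly the canonical rows
theorem pvFoldA_eq (l : List (String × List (String × Int)))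
    (x : List String) (yT yD yO yI : List Int) :
    l.foldl pvStepA (x, yT, yD, yO, yI) =
      (x ++ (pvRows l).map (·.1), yT ++ (pvRows l).map (·.2.1),
       yD ++ (pvRows l).map (·.2.2.1), yO ++ (pvRows l).map (·.2.2.2.1),
       yI ++ (pvRows l).map (·.2.2.2.2)) := by
  induction l generalizing x yT yD yO yI with
  | nil => simp [pvRows]
  | cons p rest ih =>
    rw [List.foldl_cons]
    by_cases hv : p.2 = []
    · rw [show pvStepA (x, yT, yD, yO, yI) p = (x, yT, yD, yO, yI) from by simp [pvStepA, hv]]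
      rw [ih]
      simp [pvRows, List.filter_cons, hv]
    · have hs : pvInnerA p.2 (0, 0, 0, 0) = pvRowOf p.2 := by
        rw [pvInnerA_eq]; simp [pvRowOf]
      rw [show pvStepA (x, yT, yD, yO, yI) p =
            (x ++ [p.1], yT ++ [(pvRowOf p.2).1], yD ++ [(pvRowOf p.2).2.1],
             yO ++ [(pvRowOf p.2).2.2.1], yI ++ [(pvRowOf p.2).2.2.2]) from by
          simp [pvStepA, hv, hs]]
      rw [ih]
      simp [pvRows, List.filter_cons, hv]

-- B's step, when the key is already present, is an insert of the pointwise-updated row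
theorem pvStepB_contains (acc : PySem.Dict String (Int × Int × Int × Int))
    (t : String × String × Int) (h : acc.contains t.1 = true) :
    pvStepB acc t = acc.insert t.1 (pvRowStep (acc.getD t.1 (0, 0, 0, 0)) t.2) := by
  unfold pvStepB
  rw [if_pos h]
  by_cases h1 : t.2.1 = "dnd"
  · simp [pvSlot, PySem.Dict.get?_mk_cons, h1, pvRowStep]
  · by_cases h2 : t.2.1 = "online"
    · simp [pvSlot, PySem.Dict.get?_mk_cons, h1, h2, pvRowStep, Ne.symm h1]
    · by_cases h3 : t.2.1 = "idle"
      · simp [pvSlot, PySem.Dict.get?_mk_cons, h1, h2, h3, pvRowStep, Ne.symm h1, Ne.symm h2]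
      · simp [pvSlot, PySem.Dict.get?_mk_cons, h1, h2, h3, pvRowStep, Ne.symm h1, Ne.symm h2, Ne.symm h3,
              show (PySem.Dict.mk ([] : List (String × Int))).get? t.2.1 = none from rfl]

-- B's step on a fresh key inserts the row built from the zero row
theorem pvStepB_fresh (acc : PySem.Dict String (Int × Int × Int × Int))
    (t : String × String × Int) (h : acc.contains t.1 = false) :
    pvStepB acc t = acc.insert t.1 (pvRowStep (0, 0, 0, 0) t.2) := by
  unfold pvStepB
  rw [if_neg (by simp [h])]
  simp only [PySem.Dict.getD_insert_self, PySem.Dict.insert_insert_self]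
  by_cases h1 : t.2.1 = "dnd"
  · simp [pvSlot, PySem.Dict.get?_mk_cons, h1, pvRowStep]
  · by_cases h2 : t.2.1 = "online"
    · simp [pvSlot, PySem.Dict.get?_mk_cons, h1, h2, pvRowStep, Ne.symm h1]
    · by_cases h3 : t.2.1 = "idle"
      · simp [pvSlot, PySem.Dict.get?_mk_cons, h1, h2, h3, pvRowStep, Ne.symm h1, Ne.symm h2]
      · simp [pvSlot, PySem.Dict.get?_mk_cons, h1, h2, h3, pvRowStep, Ne.symm h1, Ne.symm h2, Ne.symm h3,
              show (PySem.Dict.mk ([] : List (String × Int))).get? t.2.1 = none from rfl]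

-- running B's loop over the items of one key that is already present folds its row in place
theorem pvFoldB_key (v : List (String × Int)) (k : String)
    (acc : PySem.Dict String (Int × Int × Int × Int)) (r : Int × Int × Int × Int)
    (hnd : acc.keys.Nodup) (h : acc.contains k = true) (hr : acc.getD k (0, 0, 0, 0) = r) :
    (v.map (fun q => (k, q.1, q.2))).foldl pvStepB acc = acc.insert k (v.foldl pvRowStep r) := by
  induction v generalizing acc r with
  | nil =>
    simp only [List.map_nil, List.foldl_nil]
    refine (PySem.Dict.ext ?_).symm
    rw [PySem.Dict.items_insert_of_contains acc r h,
        show acc.items.map (fun p => if p.1 == k then (k, r) else p) = acc.items.map id from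
          List.map_congr_left ?_, List.map_id]
    intro p hp
    by_cases hpk : p.1 = k
    · subst hpk
      have h2 : acc.getD p.1 (0, 0, 0, 0) = p.2 :=
        PySem.Dict.getD_of_mem_items acc (by simpa using hp) hnd (0, 0, 0, 0)
      have hrp : r = p.2 := by rw [← hr, h2]
      simp [hrp]
    · simp [hpk]
  | cons q rest ih =>
    rw [List.map_cons, List.foldl_cons, pvStepB_contains acc _ h, hr, List.foldl_cons]
    rw [ih (acc.insert k (pvRowStep r (q.1, q.2))) (pvRowStep r (q.1, q.2))
          (PySem.Dict.nodup_keys_insert acc k _ hnd)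
          (PySem.Dict.contains_insert_self ..)
          (PySem.Dict.getD_insert_self ..),
        PySem.Dict.insert_insert_self]

-- running B's loop over the items of one fresh, non-empty key appends that key's full row
theorem pvFoldB_entry (k : String) (v : List (String × Int)) (hv : v ≠ [])
    (acc : PySem.Dict String (Int × Int × Int × Int))
    (hnd : acc.keys.Nodup) (h : acc.contains k = false) :
    (v.map (fun q => (k, q.1, q.2))).foldl pvStepB acc = acc.insert k (pvRowOf v) := by
  cases v with
  | nil => exact absurd rfl hv
  | cons q rest =>
    rw [List.map_cons, List.foldl_cons, pvStepB_fresh acc _ h]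
    rw [pvFoldB_key rest k _ (pvRowStep (0, 0, 0, 0) (q.1, q.2))
          (PySem.Dict.nodup_keys_insert acc k _ hnd)
          (PySem.Dict.contains_insert_self ..)
          (PySem.Dict.getD_insert_self ..),
        PySem.Dict.insert_insert_self]
    congr 1
    show rest.foldl pvRowStep (pvRowStep (0, 0, 0, 0) (q.1, q.2)) = pvRowOf (q :: rest)
    rw [show pvRowStep (0, 0, 0, 0) (q.1, q.2) =
        ((0 : Int) + q.2, (0 : Int) + (if q.1 = "dnd" then q.2 else 0),
         (0 : Int) + (if q.1 = "online" then q.2 else 0),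
         (0 : Int) + (if q.1 = "idle" then q.2 else 0)) from rfl, pvFoldRow_eq]
    simp [pvRowOf, pvKeySum, List.filter_cons]
    split_ifs <;> simp <;> ring

-- the flat fold over all items appends the canonical rows, entry by entry
theorem pvFoldB_eq (l : List (String × List (String × Int)))
    (acc : PySem.Dict String (Int × Int × Int × Int))
    (hnd : acc.keys.Nodup) (houter : (l.map Prod.fst).Nodup)
    (hfresh : ∀ p ∈ l, acc.contains p.1 = false) :
    ((pvItemsB l).foldl pvStepB acc).items = acc.items ++ pvRows l := by
  induction l generalizing acc with
  | nil => simp [pvItemsB, pvRows]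
  | cons p rest ih =>
    rw [show pvItemsB (p :: rest) = p.2.map (fun q => (p.1, q.1, q.2)) ++ pvItemsB rest from by
          simp [pvItemsB],
        List.foldl_append]
    rw [List.map_cons, List.nodup_cons] at houter
    by_cases hv : p.2 = []
    · rw [hv]
      simp only [List.map_nil, List.foldl_nil]
      rw [ih acc hnd houter.2 (fun q hq => hfresh q (List.mem_cons_of_mem _ hq))]
      simp [pvRows, List.filter_cons, hv]
    · rw [pvFoldB_entry p.1 p.2 hv acc hnd (hfresh p (List.mem_cons_self ..))]
      rw [ih (acc.insert p.1 (pvRowOf p.2))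
            (PySem.Dict.nodup_keys_insert acc p.1 _ hnd)
            houter.2
            (fun q hq => by
              rw [PySem.Dict.contains_insert]
              have hq1 : (q.1 == p.1) = false := by
                simp only [beq_eq_false_iff_ne, ne_eq]
                intro hqp
                exact houter.1 (hqp ▸ List.mem_map_of_mem hq)
              rw [hq1, hfresh q (List.mem_cons_of_mem _ hq)]
              rfl)]
      rw [PySem.Dict.items_insert_of_not_contains acc (pvRowOf p.2) (hfresh p (List.mem_cons_self ..))]
      simp [pvRows, List.filter_cons, hv]

theorem getTodaysLists_eq_alt (presencesDict : List (String × List (String × Int)))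
    (hpre : Pre_getTodaysLists presencesDict) :
    getTodaysLists presencesDict = getTodaysLists_alt presencesDict := by
  unfold getTodaysLists getTodaysLists_alt
  rw [pvFoldA_eq]
  have hitems : ((pvItemsB presencesDict).foldl pvStepB PySem.Dict.empty).items
      = pvRows presencesDict := by
    rw [pvFoldB_eq presencesDict PySem.Dict.empty
          (PySem.Dict.nodup_keys_empty) hpre
          (fun p _ => PySem.Dict.contains_empty ..)]
    simp [show (PySem.Dict.empty : PySem.Dict String (Int × Int × Int × Int)).items = [] from rfl]
  simp only [PySem.Dict.keys, PySem.Dict.values, hitems]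
  simp [List.map_map, Function.comp]

-- ===== VERDICT (by name: the statement is the Claim_ definition above) =====
theorem getTodaysLists_spec : Claim_equal_getTodaysLists := by
  intro pd _ hpre
  unfold Spec_getTodaysLists
  exact getTodaysLists_eq_alt pd hpre
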